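-- pv_equiv track=rewrite | github.com/cgangwar11/Coding-Practice | Python/maximum_of_minimum.py | returnlist
-- ===== SOURCE A (Python) =====
-- def returnlist(n):
--     upper = [-1]*len(n)
--     lower = [len(n)]*len(n)
--     stack = []
--     for i,j in enumerate(n):
--         while stack and j<n[stack[-1]]:
--             lower[stack[-1]] = i
--             stack.pop()
--         stack.append(i)
--     stack = []
--     for i,j in enumerate(reversed(n)):
--         i=len(n)-1-i
--         while stack and j<n[stack[-1]]:
--             upper[stack[-1]] = i
--             stack.pop()
--         stack.append(i)
--
--     return lower,upper
-- ===== SOURCE B (Python) =====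
-- def returnlist(n):
--     m = len(n)
--     lower = [m] * m
--     upper = [-1] * m
--     stack = []
--     for i, j in enumerate(n):
--         while stack and n[stack[-1]] > j:
--             lower[stack.pop()] = i
--         if stack:
--             t = stack[-1]
--             upper[i] = upper[t] if n[t] == j else t
--         stack.append(i)
--     return lower, upper
-- ===== Notes on version B (the rewrite author's own statement) =====
-- stated objective: faster
-- what changed: A makes two stack passes (forward for next-smaller, backward over reversed(n) for previous-smaller); B computes both arrays in a single forward pass with one monotonic stack, deriving upper[i] from the stack top at push time (copying upper[top] when values tie).
import Mathlib
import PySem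

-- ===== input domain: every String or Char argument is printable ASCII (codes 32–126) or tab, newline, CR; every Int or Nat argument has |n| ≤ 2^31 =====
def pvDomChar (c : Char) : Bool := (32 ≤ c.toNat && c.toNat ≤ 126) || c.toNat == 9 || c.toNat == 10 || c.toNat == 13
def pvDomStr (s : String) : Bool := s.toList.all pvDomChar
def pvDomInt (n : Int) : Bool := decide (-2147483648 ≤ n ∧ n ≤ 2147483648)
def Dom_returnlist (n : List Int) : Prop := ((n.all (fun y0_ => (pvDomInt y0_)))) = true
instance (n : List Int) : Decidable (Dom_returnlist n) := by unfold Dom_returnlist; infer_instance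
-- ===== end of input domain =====

-- Header: B computes both answers in ONE forward monotonic-stack pass (A uses two passes,
-- one of them over reversed(n)); equivalence of the return values is proved below.
-- Stack entries and the indices written by the loops are always in range, so the in-range
-- total primitives pyGetD/pySetD are exact ports of n[stack[-1]] / lower[...]=... here.

-- ===== PORT A =====
-- 'while stack and j < n[stack[-1]]: lower[stack[-1]] = i; stack.pop()'
def popLow (n : List Int) (j : Int) (i : Int) : List Int → List Int → List Int × List Int
  | low, [] => (low, [])
  | low, t :: st =>
    if j < PySem.List.pyGetD n t 0 then popLow n j i (PySem.List.pySetD low t i) st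
    else (low, t :: st)

def stepA1 (n : List Int) (s : List Int × List Int) (ij : Int × Int) : List Int × List Int :=
  let p := popLow n ij.2 ij.1 s.1 s.2
  (p.1, ij.1 :: p.2)

-- 'while stack and j < n[stack[-1]]: upper[stack[-1]] = i; stack.pop()'  (second loop)
def popUp (n : List Int) (j : Int) (i : Int) : List Int → List Int → List Int × List Int
  | up, [] => (up, [])
  | up, t :: st =>
    if j < PySem.List.pyGetD n t 0 then popUp n j i (PySem.List.pySetD up t i) st
    else (up, t :: st)

def stepA2 (n : List Int) (s : List Int × List Int) (ij : Int × Int) : List Int × List Int :=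
  let i := (n.length : Int) - 1 - ij.1
  let p := popUp n ij.2 i s.1 s.2
  (p.1, i :: p.2)

def returnlist (n : List Int) : List Int × List Int :=
  let m := n.length
  let s1 := (PySem.List.enumerate n).foldl (stepA1 n) (List.replicate m (m : Int), [])
  let s2 := (PySem.List.enumerate n.reverse).foldl (stepA2 n) (List.replicate m (-1 : Int), [])
  (s1.1, s2.1)

-- ===== PORT B =====
-- 'while stack and n[stack[-1]] > j: lower[stack.pop()] = i'
def popB (n : List Int) (j : Int) (i : Int) : List Int → List Int → List Int × List Int
  | low, [] => (low, [])
  | low, t :: st =>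
    if PySem.List.pyGetD n t 0 > j then popB n j i (PySem.List.pySetD low t i) st
    else (low, t :: st)

def stepB (n : List Int) (s : List Int × List Int × List Int) (ij : Int × Int) : List Int × List Int × List Int :=
  let p := popB n ij.2 ij.1 s.1 s.2.2
  let up := match p.2 with
    | [] => s.2.1
    | t :: _ =>
      PySem.List.pySetD s.2.1 ij.1
        (if PySem.List.pyGetD n t 0 == ij.2 then PySem.List.pyGetD s.2.1 t 0 else t)
  (p.1, up, ij.1 :: p.2)

def returnlist_alt (n : List Int) : List Int × List Int :=
  let m := n.length
  let s := (PySem.List.enumerate n).foldl (stepB n)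
    (List.replicate m (m : Int), List.replicate m (-1 : Int), [])
  (s.1, s.2.1)

-- ===== PRECONDITION & SPEC =====
def Spec_returnlist (n : List Int) (out : List Int × List Int) : Prop := out = returnlist_alt n
instance (n : List Int) (out : List Int × List Int) : Decidable (Spec_returnlist n out) := by unfold Spec_returnlist; infer_instance

-- ===== CLAIM (what is proved, stated in full; the proofs are below) =====
def Claim_equal_returnlist : Prop := ∀ (n : List Int), Dom_returnlist n → Spec_returnlist n (returnlist n)


-- ===== LEMMAS AND PROOFS =====

-- n[t] as the total in-range read both ports use
def gA (n : List Int) (t : Int) : Int := PySem.List.pyGetD n t 0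

-- "no strictly smaller element of n between k (excl.) and i (excl.)" — forward stacks
def keepF (n : List Int) (i k : Int) : Prop := ∀ l : Int, k < l → l < i → gA n k ≤ gA n l
-- "no strictly smaller element of n between i0 (incl.) and k (excl.)" — backward stack
def keepB (n : List Int) (i0 k : Int) : Prop := ∀ l : Int, i0 ≤ l → l < k → gA n k ≤ gA n l

-- largest index l < b with n[l] < v, else -1 (the 'previous smaller' answer)
def prevAux (n : List Int) (v : Int) : Nat → Int
  | 0 => -1
  | b + 1 => if gA n b < v then (b : Int) else prevAux n v b

def prev (n : List Int) (q : Nat) : Int := prevAux n (gA n q) q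

lemma getD_set_ite (xs : List Int) (a q : Nat) (v : Int) :
    (xs.set a v).getD q 0 = if q = a ∧ a < xs.length then v else xs.getD q 0 := by
  simp [List.getD_eq_getElem?_getD, List.getElem?_set]
  split_ifs <;> simp_all

-- any position l < i sees some stack survivor k ∈ [l, i) with value ≤ n[l]
lemma reachF (n : List Int) (i : Int) : ∀ l : Int, 0 ≤ l → l < i →
    ∃ k, l ≤ k ∧ k < i ∧ gA n k ≤ gA n l ∧ keepF n i k := by
  suffices H : ∀ fuel : Nat, ∀ l : Int, (i - l).toNat ≤ fuel → 0 ≤ l → l < i →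
      ∃ k, l ≤ k ∧ k < i ∧ gA n k ≤ gA n l ∧ keepF n i k by
    intro l h0 hl; exact H (i - l).toNat l le_rfl h0 hl
  intro fuel
  induction fuel with
  | zero => intro l hf h0 hl; omega
  | succ f ih =>
    intro l hf h0 hl
    by_cases hk : keepF n i l
    · exact ⟨l, le_rfl, hl, le_rfl, hk⟩
    · unfold keepF at hk
      push Not at hk
      obtain ⟨l', hll', hl'i, hg⟩ := hk
      obtain ⟨k, h1, h2, h3, h4⟩ := ih l' (by omega) (by omega) hl'i
      exact ⟨k, by omega, h2, h3.trans hg.le, h4⟩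

lemma prevAux_eq_neg_one (n : List Int) (v : Int) (b : Nat)
    (h : ∀ l : Nat, l < b → v ≤ gA n l) : prevAux n v b = -1 := by
  induction b with
  | zero => rfl
  | succ b ih =>
    simp only [prevAux]
    rw [if_neg (not_lt.mpr (h b (by omega)))]
    exact ih (fun l hl => h l (by omega))

lemma prevAux_eq_t (n : List Int) (v : Int) (t b : Nat) (htb : t < b) (hv : gA n t < v)
    (h : ∀ l : Nat, t < l → l < b → v ≤ gA n l) : prevAux n v b = t := by
  induction b with
  | zero => omega
  | succ b ih =>
    by_cases hb : t = b
    · subst hb; simp only [prevAux]; rw [if_pos hv]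
    · have htb' : t < b := by omega
      simp only [prevAux]
      rw [if_neg (not_lt.mpr (h b htb' (by omega)))]
      exact ih htb' (fun l h1 h2 => h l h1 (by omega))

lemma prevAux_down (n : List Int) (v : Int) (t b : Nat) (htb : t ≤ b)
    (h : ∀ l : Nat, t ≤ l → l < b → v ≤ gA n l) : prevAux n v b = prevAux n v t := by
  induction b with
  | zero => have : t = 0 := by omega
            subst this; rfl
  | succ b ih =>
    by_cases hb : t = b + 1
    · subst hb; rfl
    · have htb' : t ≤ b := by omega
      simp only [prevAux]
      rw [if_neg (not_lt.mpr (h b htb' (by omega)))]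
      exact ih htb' (fun l h1 h2 => h l h1 (by omega))

-- the B-pop: stack result = elements with value ≤ j, still sorted
lemma popB_stack (n : List Int) (j i : Int) : ∀ (st low : List Int),
    (∀ a ∈ st, ∀ b ∈ st, a < b → gA n a ≤ gA n b) → st.Pairwise (· > ·) →
    (∀ k, k ∈ (popB n j i low st).2 ↔ (k ∈ st ∧ gA n k ≤ j)) ∧
      (popB n j i low st).2.Pairwise (· > ·) := by
  intro st
  induction st with
  | nil =>
    intro low _ _
    refine ⟨fun k => ?_, ?_⟩ <;> simp [popB]
  | cons t rest ih =>
    intro low Hm Hp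
    by_cases hc : PySem.List.pyGetD n t 0 > j
    · have e : popB n j i low (t :: rest) = popB n j i (PySem.List.pySetD low t i) rest := by
        simp [popB, hc]
      rw [e]
      obtain ⟨c1, c2⟩ := ih (PySem.List.pySetD low t i)
        (fun a ha b hb hab => Hm a (List.mem_cons_of_mem _ ha) b (List.mem_cons_of_mem _ hb) hab)
        (List.pairwise_cons.mp Hp).2
      refine ⟨fun k => ?_, c2⟩
      rw [c1 k]
      simp only [List.mem_cons]
      constructor
      · rintro ⟨hk, hg⟩; exact ⟨Or.inr hk, hg⟩
      · rintro ⟨hk | hk, hg⟩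
        · exact absurd hg (not_le.mpr (show j < gA n k by rw [hk]; exact hc))
        · exact ⟨hk, hg⟩
    · have e : popB n j i low (t :: rest) = (low, t :: rest) := by simp [popB, hc]
      rw [e]
      refine ⟨fun k => ?_, Hp⟩
      constructor
      · intro hk
        refine ⟨hk, ?_⟩
        rcases List.mem_cons.mp hk with hk | hk
        · subst hk; exact not_lt.mp (by simpa [gA] using hc)
        · have htk : t > k := (List.pairwise_cons.mp Hp).1 k hk
          exact (Hm k (List.mem_cons_of_mem _ hk) t (List.mem_cons_self) htk).trans
            (not_lt.mp (by simpa [gA] using hc))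
      · rintro ⟨hk, _⟩; exact hk

lemma popB_eq_popLow (n : List Int) (j i : Int) : ∀ (st low : List Int),
    popB n j i low st = popLow n j i low st := by
  intro st
  induction st with
  | nil => intro low; rfl
  | cons t rest ih =>
    intro low
    by_cases hc : j < PySem.List.pyGetD n t 0 <;> simp [popB, popLow, hc, ih]

-- B's fold carries A's first loop inside it: lower and stack components coincide
lemma simAB (n : List Int) : ∀ (l : List (Int × Int)) (low up st : List Int),
    (l.foldl (stepB n) (low, up, st)).1 = (l.foldl (stepA1 n) (low, st)).1 ∧
      (l.foldl (stepB n) (low, up, st)).2.2 = (l.foldl (stepA1 n) (low, st)).2 := by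
  intro l
  induction l with
  | nil => intro low up st; exact ⟨rfl, rfl⟩
  | cons p l ih =>
    intro low up st
    have hq : popB n p.2 p.1 low st = popLow n p.2 p.1 low st := popB_eq_popLow n p.2 p.1 st low
    have hsB : stepB n (low, up, st) p =
        ((stepA1 n (low, st) p).1, (stepB n (low, up, st) p).2.1, (stepA1 n (low, st) p).2) := by
      simp [stepB, stepA1, hq]
    rw [List.foldl_cons, List.foldl_cons, hsB]
    exact ih _ _ _

-- the A-pop of the backward loop: stack result and the writes into upper
lemma popUp_spec (n : List Int) (j i : Int) : ∀ (st up : List Int),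
    (∀ a ∈ st, ∀ b ∈ st, a < b → gA n b ≤ gA n a) → st.Pairwise (· < ·) →
    (∀ k ∈ st, 0 ≤ k ∧ k.toNat < up.length) →
    (∀ k, k ∈ (popUp n j i up st).2 ↔ (k ∈ st ∧ gA n k ≤ j)) ∧
      (popUp n j i up st).2.Pairwise (· < ·) ∧
      (popUp n j i up st).1.length = up.length ∧
      (∀ q : Nat, (popUp n j i up st).1.getD q 0 =
        if ((q : Int) ∈ st ∧ j < gA n (q : Int)) then i else up.getD q 0) := by
  intro st
  induction st with
  | nil =>
    intro up _ _ _
    refine ⟨fun k => ?_, ?_, rfl, fun q => ?_⟩ <;> simp [popUp]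
  | cons t rest ih =>
    intro up Hm Hp Hlen
    obtain ⟨ht0, htlen⟩ := Hlen t List.mem_cons_self
    by_cases hc : j < PySem.List.pyGetD n t 0
    · have e : popUp n j i up (t :: rest) = popUp n j i (PySem.List.pySetD up t i) rest := by
        simp [popUp, hc]
      rw [e]
      have hset : PySem.List.pySetD up t i = up.set t.toNat i := PySem.List.pySetD_of_nonneg up i ht0
      obtain ⟨c1, c2, c3, c4⟩ := ih (PySem.List.pySetD up t i)
        (fun a ha b hb hab => Hm a (List.mem_cons_of_mem _ ha) b (List.mem_cons_of_mem _ hb) hab)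
        (List.pairwise_cons.mp Hp).2
        (fun k hk => by rw [hset, List.length_set]; exact Hlen k (List.mem_cons_of_mem _ hk))
      refine ⟨fun k => ?_, c2, by rw [c3, hset, List.length_set], fun q => ?_⟩
      · rw [c1 k]
        simp only [List.mem_cons]
        constructor
        · rintro ⟨hk, hg⟩; exact ⟨Or.inr hk, hg⟩
        · rintro ⟨hk | hk, hg⟩
          · exact absurd hg (not_le.mpr (show j < gA n k by rw [hk]; exact hc))
          · exact ⟨hk, hg⟩
      · rw [c4 q]
        by_cases h1 : (q : Int) ∈ rest ∧ j < gA n (q : Int)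
        · rw [if_pos h1, if_pos ⟨List.mem_cons_of_mem _ h1.1, h1.2⟩]
        · rw [if_neg h1, hset, getD_set_ite]
          by_cases hqt : (q : Int) = t
          · have : q = t.toNat := by omega
            subst this
            rw [if_pos ⟨rfl, htlen⟩, if_pos ⟨by rw [Int.toNat_of_nonneg ht0]; exact List.mem_cons_self, by rw [Int.toNat_of_nonneg ht0]; exact hc⟩]
          · have hq2 : ¬ (q = t.toNat ∧ t.toNat < up.length) := by
              rintro ⟨rfl, -⟩; omega
            rw [if_neg hq2]
            by_cases h3 : ((q : Int) ∈ t :: rest ∧ j < gA n (q : Int))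
            · exfalso
              rcases List.mem_cons.mp h3.1 with hk | hk
              · exact hqt hk
              · exact h1 ⟨hk, h3.2⟩
            · rw [if_neg h3]
    · have e : popUp n j i up (t :: rest) = (up, t :: rest) := by simp [popUp, hc]
      rw [e]
      refine ⟨fun k => ?_, Hp, rfl, fun q => ?_⟩
      · constructor
        · intro hk
          refine ⟨hk, ?_⟩
          rcases List.mem_cons.mp hk with hk | hk
          · subst hk; exact not_lt.mp (by simpa [gA] using hc)
          · have htk : t < k := (List.pairwise_cons.mp Hp).1 k hk
            exact (Hm t List.mem_cons_self k (List.mem_cons_of_mem _ hk) htk).trans (not_lt.mp (by simpa [gA] using hc))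
        · rintro ⟨hk, _⟩; exact hk
      · rw [if_neg]
        rintro ⟨hq, hlt⟩
        rcases List.mem_cons.mp hq with hk | hk
        · rw [hk] at hlt; exact hc hlt
        · have htk : t < (q : Int) := (List.pairwise_cons.mp Hp).1 _ hk
          have h5 := lt_of_lt_of_le hlt (Hm t List.mem_cons_self _ (List.mem_cons_of_mem _ hk) htk)
          exact hc h5

-- invariant of B's single pass after processing the first i elements
def InvB (n : List Int) (i : Nat) (s : List Int × List Int × List Int) : Prop :=
  (∀ k : Int, k ∈ s.2.2 ↔ (0 ≤ k ∧ k < (i : Int) ∧ keepF n i k)) ∧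
  s.2.2.Pairwise (· > ·) ∧
  s.2.1.length = n.length ∧
  (∀ q : Nat, q < n.length → s.2.1.getD q 0 = if q < i then prev n q else -1)

lemma stepB_inv (n : List Int) (i : Nat) (s : List Int × List Int × List Int)
    (him : i < n.length) (hI : InvB n i s) :
    InvB n (i + 1) (stepB n s ((i : Int), gA n (i : Int))) := by
  obtain ⟨low, up, st⟩ := s
  obtain ⟨hmem, hpair, hlen, hup⟩ := hI
  have hlen' : up.length = n.length := hlen
  set j := gA n (i : Int) with hj
  have Hm : ∀ a ∈ st, ∀ b ∈ st, a < b → gA n a ≤ gA n b := by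
    intro a ha b hb hab
    obtain ⟨ha0, hai, hak⟩ := (hmem a).mp ha
    obtain ⟨hb0, hbi, hbk⟩ := (hmem b).mp hb
    exact hak b hab hbi
  obtain ⟨pc, pp⟩ := popB_stack n j (i : Int) st low Hm hpair
  have hmemNew : ∀ k, k ∈ (i : Int) :: (popB n j (i : Int) low st).2 ↔
      (0 ≤ k ∧ k < ((i + 1 : Nat) : Int) ∧ keepF n ((i + 1 : Nat) : Int) k) := by
    intro k
    have hcast : ((i + 1 : Nat) : Int) = (i : Int) + 1 := by push_cast; ring
    rw [hcast]
    simp only [List.mem_cons, pc k, hmem k]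
    constructor
    · rintro (rfl | ⟨⟨h0, hki, hkF⟩, hgj⟩)
      · refine ⟨by omega, by omega, fun l h1 h2 => by omega⟩
      · refine ⟨h0, by omega, fun l h1 h2 => ?_⟩
        rcases (by omega : l < (i : Int) ∨ l = (i : Int)) with h | h
        · exact hkF l h1 h
        · rw [h]; exact hgj
    · rintro ⟨h0, hki1, hkF⟩
      by_cases hk : k = (i : Int)
      · exact Or.inl hk
      · refine Or.inr ⟨⟨h0, by omega, fun l h1 h2 => hkF l h1 (by omega)⟩, ?_⟩
        exact hkF (i : Int) (by omega) (by omega)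
  have hpairNew : ((i : Int) :: (popB n j (i : Int) low st).2).Pairwise (· > ·) := by
    refine List.pairwise_cons.mpr ⟨fun x hx => ?_, pp⟩
    have h1 := ((pc x).mp hx).1
    have h2 := ((hmem x).mp h1).2.1
    omega
  rcases hst' : (popB n j (i : Int) low st).2 with _ | ⟨t, rest⟩
  · -- the stack emptied: upper is untouched, and prev n i = -1
    have hstep : stepB n (low, up, st) ((i : Int), j) =
        ((popB n j (i : Int) low st).1, up, (i : Int) :: (popB n j (i : Int) low st).2) := by
      simp [stepB, hst']
    rw [hstep]
    refine ⟨hmemNew, hpairNew, hlen, ?_⟩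
    intro q hq
    have hprev : prev n i = -1 := by
      apply prevAux_eq_neg_one
      intro l hl
      by_contra hgl
      push Not at hgl
      obtain ⟨k, k1, k2, k3, k4⟩ := reachF n (i : Int) l (Int.natCast_nonneg l) (by exact_mod_cast hl)
      have hkst : k ∈ st := (hmem k).mpr ⟨by omega, k2, k4⟩
      have hk' : k ∈ (popB n j (i : Int) low st).2 := (pc k).mpr ⟨hkst, k3.trans hgl.le⟩
      rw [hst'] at hk'
      simp at hk'
    rw [hup q hq]
    by_cases hqi : q < i
    · rw [if_pos hqi, if_pos (by omega)]
    · rcases (by omega : q = i ∨ i < q) with h | h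
      · subst h
        rw [if_neg (by omega), if_pos (by omega), hprev]
      · rw [if_neg (by omega), if_neg (by omega)]
  · -- stack top t after popping
    have hstep : stepB n (low, up, st) ((i : Int), j) =
        ((popB n j (i : Int) low st).1,
         PySem.List.pySetD up (i : Int)
           (if PySem.List.pyGetD n t 0 == j then PySem.List.pyGetD up t 0 else t),
         (i : Int) :: (popB n j (i : Int) low st).2) := by
      simp [stepB, hst']
    rw [hstep]
    refine ⟨hmemNew, hpairNew, ?_, ?_⟩
    · rw [PySem.List.pySetD_of_nonneg up _ (Int.natCast_nonneg i), List.length_set]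
      exact hlen
    · intro q hq
      have htmem : t ∈ (popB n j (i : Int) low st).2 := by rw [hst']; exact List.mem_cons_self
      obtain ⟨htst, htj⟩ := (pc t).mp htmem
      obtain ⟨ht0, hti, htF⟩ := (hmem t).mp htst
      have hgap : ∀ l : Int, t < l → l < (i : Int) → j ≤ gA n l := by
        intro l h1 h2
        by_contra hgl
        push Not at hgl
        obtain ⟨k, k1, k2, k3, k4⟩ := reachF n (i : Int) l (by omega) h2
        have hkst : k ∈ st := (hmem k).mpr ⟨by omega, k2, k4⟩
        have hk' : k ∈ (popB n j (i : Int) low st).2 := (pc k).mpr ⟨hkst, k3.trans hgl.le⟩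
        rw [hst'] at hk'
        rcases List.mem_cons.mp hk' with h | h
        · omega
        · have pp' := pp
          rw [hst'] at pp'
          have := List.rel_of_pairwise_cons pp' h
          omega
      rw [PySem.List.pySetD_of_nonneg up _ (Int.natCast_nonneg i), Int.toNat_natCast,
        getD_set_ite]
      have htNat : ((t.toNat : Nat) : Int) = t := Int.toNat_of_nonneg ht0
      by_cases hqi : q = i
      · subst hqi
        rw [if_pos (show q = q ∧ q < up.length from ⟨rfl, by omega⟩), if_pos (show q < q + 1 by omega)]
        by_cases hte : gA n t = j
        · -- equal values: copy upper[t], and prev i = prev t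
          rw [if_pos (by simpa [gA] using hte)]
          have h1 : PySem.List.pyGetD up t 0 = up.getD t.toNat 0 := by
            conv_lhs => rw [← htNat]
            rw [PySem.List.pyGetD_natCast]
          have h2 : up.getD t.toNat 0 = prev n t.toNat := by
            rw [hup t.toNat (by omega), if_pos (by omega)]
          have h3 : prev n q = prevAux n j t.toNat := by
            show prevAux n (gA n (q : Int)) q = _
            rw [← hj]
            rw [prevAux_down n j (t.toNat + 1) q (by omega)
              (fun l hl1 hl2 => hgap l (by omega) (by exact_mod_cast (by omega : (l : Int) < (q : Int))))]
            simp only [prevAux]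
            rw [if_neg (by rw [show ((t.toNat : Nat) : Int) = t from htNat, hte]; omega)]
          have h4 : prev n t.toNat = prevAux n j t.toNat := by
            show prevAux n (gA n ((t.toNat : Nat) : Int)) t.toNat = _
            rw [htNat, hte]
          rw [h1, h2, h3, h4]
        · -- strictly smaller top: it is the answer
          rw [if_neg (show ¬((PySem.List.pyGetD n t 0 == j) = true) by
            simp only [beq_iff_eq]; exact fun h => hte h)]
          have hlt : gA n t < j := lt_of_le_of_ne htj hte
          rw [show prev n q = prevAux n (gA n (q : Int)) q from rfl, ← hj]
          rw [prevAux_eq_t n j t.toNat q (by omega) (by rwa [show ((t.toNat : Nat) : Int) = t from htNat])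
            (fun l hl1 hl2 => hgap l (by omega) (by exact_mod_cast (by omega : (l : Int) < (q : Int))))]
          omega
      · rw [if_neg (by intro h; exact hqi h.1), hup q hq]
        by_cases h : q < i
        · rw [if_pos h, if_pos (by omega)]
        · rw [if_neg h, if_neg (by omega)]

lemma loopB_inv (n : List Int) : ∀ i ≤ n.length,
    InvB n i (((PySem.List.enumerate n).take i).foldl (stepB n)
      (List.replicate n.length (n.length : Int), List.replicate n.length (-1 : Int), [])) := by
  intro i
  induction i with
  | zero =>
    intro _
    simp only [List.take_zero, List.foldl_nil]
    refine ⟨fun k => ?_, List.Pairwise.nil, by simp, fun q hq => ?_⟩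
    · constructor
      · intro h; simp at h
      · rintro ⟨h0, h1, -⟩; simp at h1; omega
    · rw [if_neg (by omega)]
      exact List.getD_replicate _ hq
  | succ i ih =>
    intro h
    have hi : i < n.length := by omega
    have hlenE : i < (PySem.List.enumerate n).length := by
      rw [PySem.List.length_enumerate]; exact hi
    rw [List.take_succ_eq_append_getElem hlenE, List.foldl_append, List.foldl_cons, List.foldl_nil]
    have hitem : (PySem.List.enumerate n)[i]'(hlenE) = ((i : Int), gA n (i : Int)) := by
      rw [PySem.List.getElem_enumerate]
      simp [gA, hi]
    rw [hitem]
    exact stepB_inv n i _ hi (ih (by omega))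

-- invariant of A's backward loop after processing the first r elements of reversed(n)
def InvU (n : List Int) (r : Nat) (s : List Int × List Int) : Prop :=
  (∀ k : Int, k ∈ s.2 ↔ (((n.length : Int) - r) ≤ k ∧ k < (n.length : Int) ∧ keepB n ((n.length : Int) - r) k)) ∧
  s.2.Pairwise (· < ·) ∧
  s.1.length = n.length ∧
  (∀ q : Nat, q < n.length →
    ((((n.length : Int) - r) ≤ (q : Int) ∧ ¬ keepB n ((n.length : Int) - r) (q : Int)) → s.1.getD q 0 = prev n q) ∧
    (¬ (((n.length : Int) - r) ≤ (q : Int) ∧ ¬ keepB n ((n.length : Int) - r) (q : Int)) → s.1.getD q 0 = -1))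

lemma stepA2_inv (n : List Int) (r : Nat) (s : List Int × List Int)
    (hrm : r < n.length) (hI : InvU n r s) :
    InvU n (r + 1) (stepA2 n s ((r : Int), gA n ((n.length : Int) - 1 - r))) := by
  obtain ⟨up, st⟩ := s
  obtain ⟨hmem, hpair, hlen, hup⟩ := hI
  have hlen' : up.length = n.length := hlen
  set i : Int := (n.length : Int) - 1 - (r : Int) with hi
  set j := gA n i with hj
  set i0 : Int := (n.length : Int) - (r : Int) with hi0
  have Hm : ∀ a ∈ st, ∀ b ∈ st, a < b → gA n b ≤ gA n a := by
    intro a ha b hb hab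
    obtain ⟨ha1, ha2, hak⟩ := (hmem a).mp ha
    obtain ⟨hb1, hb2, hbk⟩ := (hmem b).mp hb
    exact hbk a ha1 hab
  have Hr : ∀ k ∈ st, 0 ≤ k ∧ k.toNat < up.length := by
    intro k hk
    obtain ⟨h1, h2, -⟩ := (hmem k).mp hk
    omega
  obtain ⟨pc, pp, plen, pget⟩ := popUp_spec n j i st up Hm hpair Hr
  have hstep : stepA2 n (up, st) ((r : Int), j) = ((popUp n j i up st).1, i :: (popUp n j i up st).2) := by
    simp [stepA2, hi]
  rw [hstep]
  have hcast : ((n.length : Int) - ((r + 1 : Nat) : Int)) = i := by rw [hi]; push_cast; ring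
  refine ⟨?_, ?_, ?_, ?_⟩
  · intro k
    rw [hcast]
    simp only [List.mem_cons, pc k, hmem k]
    constructor
    · rintro (rfl | ⟨⟨hk1, hk2, hkB⟩, hgj⟩)
      · refine ⟨le_refl i, by omega, fun l h1 h2 => by omega⟩
      · refine ⟨by omega, hk2, fun l h1 h2 => ?_⟩
        rcases (by omega : l = i ∨ i0 ≤ l) with h | h
        · rw [h]; exact hgj
        · exact hkB l h h2
    · rintro ⟨h1, h2, hkB⟩
      by_cases hk : k = i
      · exact Or.inl hk
      · refine Or.inr ⟨⟨by omega, h2, fun l hl1 hl2 => hkB l (by omega) hl2⟩, ?_⟩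
        exact hkB i (by omega) (by omega)
  · refine List.pairwise_cons.mpr ⟨fun x hx => ?_, pp⟩
    have h1 := ((pc x).mp hx).1
    have h2 := ((hmem x).mp h1).1
    omega
  · rw [plen]; exact hlen
  · intro q hq
    rw [pget q, hcast]
    by_cases hc : ((q : Int) ∈ st ∧ j < gA n (q : Int))
    · rw [if_pos hc]
      obtain ⟨hqst, hqj⟩ := hc
      obtain ⟨hq1, hq2, hqB⟩ := (hmem _).mp hqst
      have h0i : 0 ≤ i := by omega
      have hprev : prev n q = i := by
        have h5 : prevAux n (gA n (q : Int)) q = ((i.toNat : Nat) : Int) :=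
          prevAux_eq_t n _ i.toNat q (by omega)
            (by rw [show ((i.toNat : Nat) : Int) = i from Int.toNat_of_nonneg h0i]; exact hqj)
            (fun l hl1 hl2 => hqB l (by omega) (by exact_mod_cast hl2))
        rw [prev, h5, Int.toNat_of_nonneg h0i]
      constructor
      · intro _; rw [hprev]
      · intro hcon
        exfalso
        apply hcon
        refine ⟨by omega, fun hkB => ?_⟩
        have h6 := hkB i (le_refl i) (by omega)
        rw [← hj] at h6
        exact absurd h6 (not_le.mpr hqj)
    · rw [if_neg hc]
      by_cases hqst : (q : Int) ∈ st
      · have hgle : gA n (q : Int) ≤ j := by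
          by_contra hgt
          push Not at hgt
          exact hc ⟨hqst, hgt⟩
        obtain ⟨hq1, hq2, hqB⟩ := (hmem _).mp hqst
        have hold := (hup q hq).2 (by rintro ⟨-, b⟩; exact b hqB)
        constructor
        · rintro ⟨h1, h2⟩
          exfalso
          apply h2
          intro l hl1 hl2
          rcases (by omega : l = i ∨ i0 ≤ l) with h | h
          · rw [h, ← hj]; exact hgle
          · exact hqB l h hl2
        · intro _; exact hold
      · by_cases hq0 : i0 ≤ (q : Int)
        · have hnk : ¬ keepB n i0 (q : Int) := by
            intro hkB
            exact hqst ((hmem _).mpr ⟨hq0, by omega, hkB⟩)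
          have hold := (hup q hq).1 ⟨hq0, hnk⟩
          constructor
          · intro _; exact hold
          · intro hcon
            exfalso
            apply hcon
            exact ⟨by omega, fun hkB => hnk (fun l hl1 hl2 => hkB l (by omega) hl2)⟩
        · have hold := (hup q hq).2 (by rintro ⟨a, -⟩; exact hq0 a)
          constructor
          · rintro ⟨h1, h2⟩
            exfalso
            apply h2
            intro l hl1 hl2
            exfalso
            omega
          · intro _; exact hold

lemma loopU_inv (n : List Int) : ∀ r ≤ n.length,
    InvU n r (((PySem.List.enumerate n.reverse).take r).foldl (stepA2 n)
      (List.replicate n.length (-1 : Int), [])) := by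
  intro r
  induction r with
  | zero =>
    intro _
    simp only [List.take_zero, List.foldl_nil]
    refine ⟨fun k => ?_, List.Pairwise.nil, by simp, fun q hq => ?_⟩
    · constructor
      · intro h; simp at h
      · rintro ⟨h0, h1, -⟩; simp at h0; omega
    · constructor
      · rintro ⟨h1, -⟩; exfalso; simp at h1; omega
      · intro _; exact List.getD_replicate _ hq
  | succ r ih =>
    intro h
    have hr : r < n.length := by omega
    have hlenE : r < (PySem.List.enumerate n.reverse).length := by
      rw [PySem.List.length_enumerate, List.length_reverse]; exact hr
    rw [List.take_succ_eq_append_getElem hlenE, List.foldl_append, List.foldl_cons, List.foldl_nil]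
    have hitem : (PySem.List.enumerate n.reverse)[r]'(hlenE) = ((r : Int), gA n ((n.length : Int) - 1 - r)) := by
      rw [PySem.List.getElem_enumerate]
      have h1 : (n.reverse)[r]'(by rw [List.length_reverse]; exact hr) = n[n.length - 1 - r]'(by omega) :=
        List.getElem_reverse _
      have h2 : ((n.length : Int) - 1 - (r : Int)) = ((n.length - 1 - r : Nat) : Int) := by omega
      simp [gA, h1, h2, (by omega : n.length - 1 - r < n.length)]
    rw [hitem]
    exact stepA2_inv n r _ hr (ih (by omega))

-- ===== VERDICT (by name: the statement is the Claim_ definition above) =====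
theorem returnlist_spec : Claim_equal_returnlist := by
  intro n _
  show returnlist n = returnlist_alt n
  have hfullB := loopB_inv n n.length le_rfl
  rw [show (PySem.List.enumerate n).take n.length = PySem.List.enumerate n by
    rw [← PySem.List.length_enumerate (xs := n) (s := 0)]; exact List.take_length] at hfullB
  have hfullU := loopU_inv n n.length le_rfl
  rw [show (PySem.List.enumerate n.reverse).take n.length = PySem.List.enumerate n.reverse by
    rw [show n.length = (PySem.List.enumerate n.reverse).length by
      rw [PySem.List.length_enumerate, List.length_reverse]]
    exact List.take_length] at hfullU
  obtain ⟨-, -, hBlen, hBup⟩ := hfullB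
  obtain ⟨-, -, hUlen, hUup⟩ := hfullU
  have hsim := simAB n (PySem.List.enumerate n)
    (List.replicate n.length (n.length : Int)) (List.replicate n.length (-1 : Int)) []
  simp only [returnlist, returnlist_alt]
  rw [Prod.mk.injEq]
  refine ⟨hsim.1.symm, ?_⟩
  apply List.ext_getElem (by rw [hUlen, hBlen])
  intro q h1 h2
  have hq : q < n.length := by rwa [hUlen] at h1
  rw [← List.getD_eq_getElem _ 0 h1, ← List.getD_eq_getElem _ 0 h2]
  have hU : (((PySem.List.enumerate n.reverse)).foldl (stepA2 n)
      (List.replicate n.length (-1 : Int), [])).1.getD q 0 = prev n q := by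
    have h0 : ((n.length : Int) - ((n.length : Nat) : Int)) = 0 := by omega
    rw [h0] at hUup
    by_cases hkB : keepB n 0 (q : Int)
    · have hv := (hUup q hq).2 (by rintro ⟨-, b⟩; exact b hkB)
      rw [hv]
      symm
      apply prevAux_eq_neg_one
      intro l hl
      exact hkB (l : Int) (Int.natCast_nonneg l) (by exact_mod_cast hl)
    · exact (hUup q hq).1 ⟨Int.natCast_nonneg q, hkB⟩
  have hB : (((PySem.List.enumerate n)).foldl (stepB n)
      (List.replicate n.length (n.length : Int), List.replicate n.length (-1 : Int), [])).2.1.getD q 0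
      = prev n q := by
    rw [hBup q hq, if_pos hq]
  rw [hU, hB]
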